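-- pv_equiv track=rewrite | github.com/ClaraPilven/Twixt | check_victory.py | next_wall_p2
-- ===== SOURCE A (Python) =====
-- def next_wall_p2(G, s):
--     p2_win = ['023', '123', '223', '323', '423', '523', '623', '723', '823', '923', '1023', '1123', '1223', '1323', '1423', '1523', '1623', '1723', '1823', '1923', '2023', '2123', '2223', '2323']
--     color = dict()
--     for v in G: color[v] = "white"
--     P = dict()
--     P[s] = None
--     color[s]='grey'
--     Q=[s]
--     while Q:
--         u=Q[-1]
--         R=[y for y in G[u] if color[y]=='white']
--         if R:
--             if R[0] in p2_win:
--                 return True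
--             v=R[0]
--             color[v]='grey'
--             P[v]=u
--             Q.append(v)
--         else:
--             Q.pop()
--             color[u]='black'
--     return False
-- ===== SOURCE B (Python) =====
-- def next_wall_p2(G, s):
--     p2_win = {'023', '123', '223', '323', '423', '523', '623', '723', '823',
--               '923', '1023', '1123', '1223', '1323', '1423', '1523', '1623',
--               '1723', '1823', '1923', '2023', '2123', '2223', '2323'}
--     seen = {s}
--     queue = [s]
--     for u in queue:                 # queue grows while we iterate: worklist closure
--         for v in G[u]:
--             if v not in seen:
--                 seen.add(v)
--                 queue.append(v)
--     return any(v != s and v in p2_win for v in seen)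
-- ===== Notes on version B (the rewrite author's own statement) =====
-- stated objective: faster
-- what changed: Replaces the DFS stack that re-scans the top vertex's whole adjacency list for a white neighbour on every push/pop (with colour/parent bookkeeping and an early return) by a linear worklist closure that visits each vertex and edge once to build the reachable set, followed by a single any() scan for a winning vertex other than s.
-- outside the precondition, e.g. on next_wall_p2({'a': [], 'b': ['x']}, 'a'): A returns False, B returns False; on next_wall_p2({'a': ['023'], '023': ['x']}, 'a'): A returns True, B raises KeyError
import Mathlib
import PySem

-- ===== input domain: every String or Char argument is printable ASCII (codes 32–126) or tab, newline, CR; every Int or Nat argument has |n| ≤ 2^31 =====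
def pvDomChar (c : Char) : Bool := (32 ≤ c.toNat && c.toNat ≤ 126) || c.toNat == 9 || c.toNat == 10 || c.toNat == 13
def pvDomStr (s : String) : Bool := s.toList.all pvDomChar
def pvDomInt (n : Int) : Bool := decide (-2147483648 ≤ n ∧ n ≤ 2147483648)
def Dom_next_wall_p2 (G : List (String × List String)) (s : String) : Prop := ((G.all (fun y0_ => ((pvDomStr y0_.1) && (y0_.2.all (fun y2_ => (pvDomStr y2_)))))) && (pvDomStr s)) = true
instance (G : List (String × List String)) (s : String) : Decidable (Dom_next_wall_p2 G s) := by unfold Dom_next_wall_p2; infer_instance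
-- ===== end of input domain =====

-- B replaces A's DFS stack (which re-filters the top vertex's adjacency list on every push/pop)
-- by a one-pass worklist closure computing the reachable set, then a single scan for a winning vertex.

-- ===== PORT A =====
-- The winning boundary vertices (A's list literal).
def p2winA : List String := ["023", "123", "223", "323", "423", "523", "623", "723", "823", "923", "1023", "1123", "1223", "1323", "1423", "1523", "1623", "1723", "1823", "1923", "2023", "2123", "2223", "2323"]

-- G[u]: first-match association-list lookup (the dict parameter); `.getD []` is exact under
-- Pre_next_wall_p2 (every looked-up vertex is a key; Python raises KeyError otherwise).
def lookA (G : List (String × List String)) (u : String) : List String :=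
  ((G.find? (fun p => p.1 == u)).map (·.2)).getD []

-- The while-loop of A: state = (color, P, Q); fuel is a termination guard only, proved
-- sufficient (the measure 2·#white + |Q| drops each iteration; see lemmas below).
def nwA_loop (G : List (String × List String)) (fuel : Nat)
    (color : PySem.Dict String String) (P : PySem.Dict String (Option String))
    (Q : List String) : Bool :=
  match fuel with
  | 0 => false
  | fuel + 1 =>
    match Q.getLast? with          -- while Q: u = Q[-1]  (getLast? = none ↔ the while exits)
    | none => false
    | some u =>
      -- R = [y for y in G[u] if color[y] == 'white']; color[y] for a missing key is a
      -- KeyError in Python (excluded by Pre_next_wall_p2); here it tests ≠ 'white'.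
      match (lookA G u).filter (fun y => color.get? y == some "white") with
      | [] => nwA_loop G fuel (color.insert u "black") P Q.dropLast      -- Q.pop(); color[u]='black'
      | r :: _ =>
        if r ∈ p2winA then true
        else nwA_loop G fuel (color.insert r "grey") (P.insert r (some u)) (Q ++ [r])

def next_wall_p2 (G : List (String × List String)) (s : String) : Bool :=
  let color := G.foldl (fun (d : PySem.Dict String String) p => d.insert p.1 "white") PySem.Dict.empty
  let P : PySem.Dict String (Option String) := PySem.Dict.empty.insert s none
  let color := color.insert s "grey"
  nwA_loop G (2 * G.length + 2) color P [s]

-- ===== PORT B =====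
def p2winB : PySem.Set String := PySem.Set.ofList ["023", "123", "223", "323", "423", "523", "623", "723", "823", "923", "1023", "1123", "1223", "1323", "1423", "1523", "1623", "1723", "1823", "1923", "2023", "2123", "2223", "2323"]

def lookB (G : List (String × List String)) (u : String) : List String :=
  ((G.find? (fun p => p.1 == u)).map (·.2)).getD []

-- `for u in queue:` over a list that grows while iterated = index recursion; fuel is a
-- termination guard only, proved sufficient (i never exceeds |distinct keys| + 1).
def nwB_loop (G : List (String × List String)) (fuel : Nat)
    (seen : PySem.Set String) (queue : List String) (i : Nat) : PySem.Set String :=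
  match fuel with
  | 0 => seen
  | fuel + 1 =>
    match queue[i]? with
    | none => seen
    | some u =>
      let sq := (lookB G u).foldl
        (fun (sq : PySem.Set String × List String) v =>
          if v ∈ sq.1 then sq else (PySem.Set.add sq.1 v, sq.2 ++ [v])) (seen, queue)
      nwB_loop G fuel sq.1 sq.2 (i + 1)

def next_wall_p2_alt (G : List (String × List String)) (s : String) : Bool :=
  let seen := nwB_loop G (G.length + 2) (PySem.Set.ofList [s]) [s] 0
  seen.any (fun v => (v != s) && p2winB.contains v)

-- ===== PRECONDITION & SPEC =====
-- Pre_ restricts to well-formed graphs: s and every listed neighbour are keys of G. Outside it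
-- A raises KeyError as soon as a missing vertex is looked up, which depends on traversal order,
-- so graphs whose dangling edges happen never to be reached are excluded as well.
def Pre_next_wall_p2 (G : List (String × List String)) (s : String) : Prop :=
  s ∈ G.map Prod.fst ∧ ∀ p ∈ G, ∀ y ∈ p.2, y ∈ G.map Prod.fst
instance (G : List (String × List String)) (s : String) : Decidable (Pre_next_wall_p2 G s) := by
  unfold Pre_next_wall_p2; infer_instance

def pvWitness_next_wall_p2 : (List (String × List String)) × String :=
  ([("a", ["023"]), ("023", [])], "a")

def Spec_next_wall_p2 (G : List (String × List String)) (s : String) (out : Bool) : Prop := out = next_wall_p2_alt G s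
instance (G : List (String × List String)) (s : String) (out : Bool) : Decidable (Spec_next_wall_p2 G s out) := by unfold Spec_next_wall_p2; infer_instance

-- ===== CLAIM (what is proved, stated in full; the proofs are below) =====
def Claim_equal_next_wall_p2 : Prop := ∀ (G : List (String × List String)) (s : String), Dom_next_wall_p2 G s → Pre_next_wall_p2 G s → Spec_next_wall_p2 G s (next_wall_p2 G s)

-- ===== LEMMAS AND PROOFS =====

-- Keys of the graph.
def keysOf (G : List (String × List String)) : List String := G.map Prod.fst

-- Reachability from s along listed neighbours.
inductive ReachG (G : List (String × List String)) (s : String) : String → Prop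
  | base : ReachG G s s
  | step {u v : String} : ReachG G s u → v ∈ lookA G u → ReachG G s v

-- The common characterisation of both results.
def WinReach (G : List (String × List String)) (s : String) : Prop :=
  ∃ v, ReachG G s v ∧ v ≠ s ∧ v ∈ p2winA

lemma lookA_subset_keys (G : List (String × List String))
    (hcl : ∀ p ∈ G, ∀ y ∈ p.2, y ∈ G.map Prod.fst) (u : String) :
    ∀ y ∈ lookA G u, y ∈ keysOf G := by
  intro y hy
  unfold lookA at hy
  cases hfind : G.find? (fun p => p.1 == u) with
  | none => simp [hfind] at hy
  | some p =>
    simp [hfind] at hy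
    exact hcl p (List.mem_of_find?_eq_some hfind) y hy

-- ===== A-side proof =====

-- 'nonwhite' in A's colouring.
def NW (c : PySem.Dict String String) (v : String) : Prop :=
  c.get? v = some "grey" ∨ c.get? v = some "black"

def InvA (G : List (String × List String)) (s : String)
    (c : PySem.Dict String String) (Q : List String) : Prop :=
  Q.Nodup ∧
  (∀ v, c.get? v = some "grey" ↔ v ∈ Q) ∧
  (∀ v, (c.get? v).isSome ↔ v ∈ keysOf G) ∧
  (∀ v, NW c v → ReachG G s v) ∧
  (∀ v, NW c v → v ≠ s → v ∉ p2winA) ∧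
  (∀ v, c.get? v = some "black" → ∀ y ∈ lookA G v, NW c y) ∧
  NW c s ∧
  (∀ v w, c.get? v = some w → w = "white" ∨ w = "grey" ∨ w = "black")

def measureA (G : List (String × List String)) (c : PySem.Dict String String)
    (Q : List String) : Nat :=
  2 * (keysOf G).countP (fun k => c.get? k == some "white") + Q.length

lemma countP_lt_of_flip {l : List String} {p q : String → Bool} {r : String}
    (hr : r ∈ l) (hp : p r = true) (hq : q r = false)
    (hothers : ∀ k, k ≠ r → q k = p k) : l.countP q < l.countP p := by
  induction l with
  | nil => cases hr
  | cons a t ih =>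
    rw [List.countP_cons, List.countP_cons]
    rcases List.mem_cons.1 hr with rfl | hrt
    · rw [hp, hq]
      have : t.countP q ≤ t.countP p := by
        apply List.countP_mono_left
        intro x hx hqx
        by_cases hxr : x = r
        · subst hxr; rw [hq] at hqx; cases hqx
        · rw [← hothers x hxr]; exact hqx
      simp only [Bool.false_eq_true, if_false, if_true]
      omega
    · have := ih hrt
      by_cases har : a = r
      · subst har; rw [hp, hq]
        simp only [Bool.false_eq_true, if_false, if_true]
        omega
      · rw [hothers a har]; omega

lemma countP_eq_of_agree {l : List String} {p q : String → Bool}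
    (h : ∀ k ∈ l, q k = p k) : l.countP q = l.countP p :=
  List.countP_congr (fun x hx => by rw [h x hx])

-- The main A-side loop lemma.
lemma nwA_loop_iff (G : List (String × List String)) (s : String)
    (hcl : ∀ p ∈ G, ∀ y ∈ p.2, y ∈ G.map Prod.fst) :
    ∀ fuel c P Q, InvA G s c Q → measureA G c Q < fuel →
      (nwA_loop G fuel c P Q = true ↔ WinReach G s) := by
  intro fuel
  induction fuel with
  | zero => intro c P Q _ hm; omega
  | succ fuel ih =>
    intro c P Q hInv hm
    obtain ⟨hnd, hgrey, hdom, hreach, hnowin, hblack, hsNW, hvals⟩ := hInv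
    cases hQ : Q.getLast? with
    | none =>
      have hQnil : Q = [] := List.getLast?_eq_none_iff.1 hQ
      rw [show nwA_loop G (fuel + 1) c P Q = false by rw [nwA_loop, hQ]]
      simp only [Bool.false_eq_true, false_iff]
      rintro ⟨v, hv, hvs, hwin⟩
      have hNWreach : ∀ x, ReachG G s x → NW c x := by
        intro x hx
        induction hx with
        | base => exact hsNW
        | step hu hy ihu =>
          rcases ihu with hg | hb
          · rw [hgrey, hQnil] at hg; simp at hg
          · exact hblack _ hb _ hy
      exact hnowin v (hNWreach v hv) hvs hwin
    | some u =>
      have hQd : Q.dropLast ++ [u] = Q := List.dropLast_append_getLast? u hQ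
      have huQ : u ∈ Q := by rw [← hQd]; exact List.mem_append_right _ (List.mem_singleton_self u)
      have hugrey : c.get? u = some "grey" := (hgrey u).2 huQ
      have hgetI : ∀ (k w : String) (x : String),
          (c.insert k w).get? x = if x = k then some w else c.get? x := fun k w x =>
        PySem.Dict.get?_insert c k x w
      cases hR : (lookA G u).filter (fun y => c.get? y == some "white") with
      | nil =>
        rw [show nwA_loop G (fuel + 1) c P Q
              = nwA_loop G fuel (c.insert u "black") P Q.dropLast by
            simp only [nwA_loop, hQ, hR]]
        have hRnil : ∀ y ∈ lookA G u, c.get? y ≠ some "white" := by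
          intro y hy hwy
          have := List.filter_eq_nil_iff.1 hR y hy
          rw [hwy] at this
          simp at this
        have hnbNW : ∀ y ∈ lookA G u, NW c y := by
          intro y hy
          have hyK : y ∈ keysOf G := lookA_subset_keys G hcl u y hy
          have hysome := (hdom y).2 hyK
          cases hyv : c.get? y with
          | none => rw [hyv] at hysome; cases hysome
          | some w =>
            rcases hvals y w hyv with rfl | rfl | rfl
            · exact absurd hyv (hRnil y hy)
            · exact Or.inl hyv
            · exact Or.inr hyv
        have hnotin : u ∉ Q.dropLast := by
          intro hin
          have hnd' : (Q.dropLast ++ [u]).Nodup := by rw [hQd]; exact hnd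
          rcases List.nodup_append.1 hnd' with ⟨_, _, hdisj⟩
          exact hdisj u hin u (List.mem_singleton_self u) rfl
        have hmemd : ∀ v, v ∈ Q.dropLast ↔ (v ∈ Q ∧ v ≠ u) := by
          intro v
          constructor
          · intro hv
            refine ⟨by rw [← hQd]; exact List.mem_append_left _ hv, ?_⟩
            intro hvu; subst hvu; exact hnotin hv
          · rintro ⟨hvQ, hvu⟩
            rw [← hQd] at hvQ
            rcases List.mem_append.1 hvQ with h | h
            · exact h
            · rw [List.mem_singleton] at h; exact absurd h hvu
        have hNWmono : ∀ x, NW c x → NW (c.insert u "black") x := by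
          intro x hx
          by_cases hxu : x = u
          · subst hxu; exact Or.inr (by rw [hgetI]; simp)
          · rcases hx with h | h
            · exact Or.inl (by rw [hgetI]; simp [hxu, h])
            · exact Or.inr (by rw [hgetI]; simp [hxu, h])
        apply ih
        · refine ⟨List.Nodup.sublist (List.dropLast_sublist Q) hnd, ?_, ?_, ?_, ?_, ?_, ?_, ?_⟩
          · intro v
            rw [hgetI, hmemd]
            by_cases hvu : v = u
            · subst hvu; simp
            · simp [hvu, hgrey]
          · intro v
            rw [hgetI]
            by_cases hvu : v = u
            · subst hvu
              simp only [if_pos]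
              constructor
              · intro _; exact (hdom _).1 (by rw [hugrey]; rfl)
              · intro _; rfl
            · simp only [if_neg hvu]; exact hdom v
          · intro v hv
            by_cases hvu : v = u
            · subst hvu; exact hreach _ (Or.inl hugrey)
            · rcases hv with h | h <;> rw [hgetI, if_neg hvu] at h
              · exact hreach v (Or.inl h)
              · exact hreach v (Or.inr h)
          · intro v hv hvs
            by_cases hvu : v = u
            · subst hvu; exact hnowin _ (Or.inl hugrey) hvs
            · rcases hv with h | h <;> rw [hgetI, if_neg hvu] at h
              · exact hnowin v (Or.inl h) hvs
              · exact hnowin v (Or.inr h) hvs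
          · intro v hv y hy
            by_cases hvu : v = u
            · subst hvu; exact hNWmono y (hnbNW y hy)
            · rw [hgetI, if_neg hvu] at hv
              exact hNWmono y (hblack v hv y hy)
          · exact hNWmono s hsNW
          · intro v w hvw
            by_cases hvu : v = u
            · subst hvu; rw [hgetI, if_pos rfl] at hvw
              right; right; exact (Option.some_inj.1 hvw).symm
            · rw [hgetI, if_neg hvu] at hvw; exact hvals v w hvw
        · have hcnt : (keysOf G).countP (fun k => (c.insert u "black").get? k == some "white")
              = (keysOf G).countP (fun k => c.get? k == some "white") := by
            apply countP_eq_of_agree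
            intro k _
            by_cases hku : k = u
            · subst hku; rw [hgetI, if_pos rfl, hugrey]; rfl
            · rw [hgetI, if_neg hku]
          have hlen : Q.length = Q.dropLast.length + 1 := by
            conv_lhs => rw [← hQd]
            simp
          unfold measureA at hm ⊢
          rw [hcnt]
          omega
      | cons r rest =>
        have hrmem : r ∈ (lookA G u).filter (fun y => c.get? y == some "white") := by
          rw [hR]; exact List.mem_cons_self
        rcases List.mem_filter.1 hrmem with ⟨hrnb, hrwb⟩
        have hrw : c.get? r = some "white" := by
          rwa [beq_iff_eq] at hrwb
        have hrs : r ≠ s := by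
          intro h; subst h
          rcases hsNW with h | h <;> rw [hrw] at h <;> simp at h
        have hrQ : r ∉ Q := by
          intro h
          have := (hgrey r).2 h
          rw [hrw] at this; simp at this
        have hrK : r ∈ keysOf G := (hdom r).1 (by rw [hrw]; rfl)
        by_cases hw : r ∈ p2winA
        · rw [show nwA_loop G (fuel + 1) c P Q = true by
            simp only [nwA_loop, hQ, hR]; simp [hw]]
          simp only [true_iff]
          exact ⟨r, ReachG.step (hreach u (Or.inl hugrey)) hrnb, hrs, hw⟩
        · rw [show nwA_loop G (fuel + 1) c P Q
                = nwA_loop G fuel (c.insert r "grey") (P.insert r (some u)) (Q ++ [r]) by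
              simp only [nwA_loop, hQ, hR]; simp [hw]]
          have hNWmono : ∀ x, NW c x → NW (c.insert r "grey") x := by
            intro x hx
            by_cases hxr : x = r
            · subst hxr; exact Or.inl (by rw [hgetI]; simp)
            · rcases hx with h | h
              · exact Or.inl (by rw [hgetI]; simp [hxr, h])
              · exact Or.inr (by rw [hgetI]; simp [hxr, h])
          apply ih
          · refine ⟨?_, ?_, ?_, ?_, ?_, ?_, ?_, ?_⟩
            · refine List.nodup_append.2 ⟨hnd, List.nodup_singleton r, ?_⟩
              intro a ha b hb heq
              rw [List.mem_singleton] at hb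
              subst hb; subst heq; exact hrQ ha
            · intro v
              rw [hgetI]
              by_cases hvr : v = r
              · subst hvr; simp
              · rw [if_neg hvr, hgrey]
                simp [List.mem_append, hvr]
            · intro v
              rw [hgetI]
              by_cases hvr : v = r
              · subst hvr; simp [hrK]
              · simp only [if_neg hvr]; exact hdom v
            · intro v hv
              by_cases hvr : v = r
              · subst hvr; exact ReachG.step (hreach u (Or.inl hugrey)) hrnb
              · rcases hv with h | h <;> rw [hgetI, if_neg hvr] at h
                · exact hreach v (Or.inl h)
                · exact hreach v (Or.inr h)
            · intro v hv hvs
              by_cases hvr : v = r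
              · subst hvr; exact hw
              · rcases hv with h | h <;> rw [hgetI, if_neg hvr] at h
                · exact hnowin v (Or.inl h) hvs
                · exact hnowin v (Or.inr h) hvs
            · intro v hv y hy
              by_cases hvr : v = r
              · subst hvr; rw [hgetI, if_pos rfl] at hv; simp at hv
              · rw [hgetI, if_neg hvr] at hv
                exact hNWmono y (hblack v hv y hy)
            · exact hNWmono s hsNW
            · intro v w hvw
              by_cases hvr : v = r
              · subst hvr; rw [hgetI, if_pos rfl] at hvw
                right; left; exact (Option.some_inj.1 hvw).symm
              · rw [hgetI, if_neg hvr] at hvw; exact hvals v w hvw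
          · have hcnt : (keysOf G).countP (fun k => (c.insert r "grey").get? k == some "white")
                < (keysOf G).countP (fun k => c.get? k == some "white") := by
              apply countP_lt_of_flip hrK
              · rw [hrw]; rfl
              · rw [hgetI, if_pos rfl]; rfl
              · intro k hkr; rw [hgetI, if_neg hkr]
            unfold measureA at hm ⊢
            rw [List.length_append, List.length_singleton]
            omega

lemma get?_foldl_white (G : List (String × List String)) :
    ∀ (d0 : PySem.Dict String String) (v : String),
      (G.foldl (fun (d : PySem.Dict String String) p => d.insert p.1 "white") d0).get? v
        = if v ∈ keysOf G then some "white" else d0.get? v := by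
  induction G with
  | nil => intro d0 v; simp [keysOf]
  | cons p t ih =>
    intro d0 v
    rw [List.foldl_cons, ih]
    simp only [keysOf, List.map_cons, List.mem_cons]
    by_cases hvt : v ∈ List.map Prod.fst t
    · simp [hvt]
    · by_cases hvp : v = p.1
      · subst hvp
        simp [hvt, PySem.Dict.get?_insert_self]
      · simp [hvt, hvp, PySem.Dict.get?_insert_of_ne d0 "white" (by exact hvp)]

lemma color0_get? (G : List (String × List String)) (s : String) (v : String) :
    ((G.foldl (fun (d : PySem.Dict String String) p => d.insert p.1 "white") PySem.Dict.empty).insert s "grey").get? v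
      = if v = s then some "grey" else (if v ∈ keysOf G then some "white" else none) := by
  by_cases hvs : v = s
  · subst hvs; simp [PySem.Dict.get?_insert_self]
  · rw [PySem.Dict.get?_insert_of_ne _ _ hvs, get?_foldl_white]
    simp [hvs, PySem.Dict.get?_empty]

lemma A_iff (G : List (String × List String)) (s : String) (hpre : Pre_next_wall_p2 G s) :
    (next_wall_p2 G s = true ↔ WinReach G s) := by
  obtain ⟨hsk, hcl⟩ := hpre
  have hc0 := color0_get? G s
  show nwA_loop G (2 * G.length + 2)
      ((G.foldl (fun (d : PySem.Dict String String) p => d.insert p.1 "white") PySem.Dict.empty).insert s "grey")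
      (PySem.Dict.empty.insert s none) [s] = true ↔ WinReach G s
  apply nwA_loop_iff G s hcl
  · refine ⟨List.nodup_singleton s, ?_, ?_, ?_, ?_, ?_, ?_, ?_⟩
    · intro v
      rw [hc0 v]
      by_cases hv : v = s
      · subst hv; simp
      · simp only [List.mem_singleton, hv, iff_false]
        split_ifs <;> simp_all
    · intro v
      rw [hc0 v]
      by_cases hv : v = s
      · subst hv; simp [keysOf, hsk]
      · simp only [if_neg hv]
        split_ifs with h <;> simp [h]
    · intro v hv
      by_cases hvs : v = s
      · subst hvs; exact ReachG.base
      · exfalso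
        rcases hv with h | h <;> rw [hc0 v, if_neg hvs] at h <;>
          split_ifs at h <;> simp_all
    · intro v hv hvs
      exfalso
      rcases hv with h | h <;> rw [hc0 v, if_neg hvs] at h <;>
        split_ifs at h <;> simp_all
    · intro v hb
      exfalso
      rw [hc0 v] at hb
      split_ifs at hb <;> simp_all
    · exact Or.inl (by rw [hc0 s]; simp)
    · intro v w hvw
      rw [hc0 v] at hvw
      split_ifs at hvw <;> simp_all
  · have hle := List.countP_le_length
      (p := fun k => (((G.foldl (fun (d : PySem.Dict String String) p => d.insert p.1 "white") PySem.Dict.empty).insert s "grey").get? k == some "white")) (l := keysOf G)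
    have hK : (keysOf G).length = G.length := List.length_map ..
    unfold measureA
    simp only [List.length_singleton]
    omega

-- ===== B-side proof =====

def InvB (G : List (String × List String)) (s : String) (q : List String) (i : Nat) : Prop :=
  q.Nodup ∧ (∀ v ∈ q, ReachG G s v) ∧ (∀ v ∈ q, v ∈ keysOf G) ∧ s ∈ q ∧
  (∀ j u, j < i → q[j]? = some u → ∀ y ∈ lookA G u, y ∈ q)

lemma foldB_spec (G : List (String × List String)) (l : List String) :
    ∀ q : List String, q.Nodup →
      ∃ ext : List String,
        l.foldl (fun (sq : PySem.Set String × List String) v =>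
          if v ∈ sq.1 then sq else (PySem.Set.add sq.1 v, sq.2 ++ [v])) (q, q)
          = (q ++ ext, q ++ ext) ∧
        (q ++ ext).Nodup ∧ (∀ x ∈ ext, x ∈ l) ∧ (∀ x ∈ l, x ∈ q ++ ext) := by
  induction l with
  | nil => intro q hq; exact ⟨[], by simp, by simpa using hq, by simp, by simp⟩
  | cons v t ih =>
    intro q hq
    by_cases hv : v ∈ q
    · obtain ⟨ext, heq, hnd, hsub, hall⟩ := ih q hq
      refine ⟨ext, ?_, hnd, fun x hx => List.mem_cons_of_mem _ (hsub x hx), ?_⟩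
      · simpa [hv] using heq
      · intro x hx
        rcases List.mem_cons.1 hx with rfl | hxt
        · exact List.mem_append_left _ hv
        · exact hall x hxt
    · have hq' : (q ++ [v]).Nodup := by
        refine List.nodup_append.2 ⟨hq, List.nodup_singleton v, ?_⟩
        intro a ha b hb heq
        rw [List.mem_singleton] at hb
        subst hb; subst heq; exact hv ha
      obtain ⟨ext, heq, hnd, hsub, hall⟩ := ih (q ++ [v]) hq'
      refine ⟨v :: ext, ?_, by simpa using hnd, ?_, ?_⟩
      · rw [List.foldl_cons]
        simp only [hv, PySem.Set.add_of_not_mem hv]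
        simpa using heq
      · intro x hx
        rcases List.mem_cons.1 hx with rfl | hxe
        · exact List.mem_cons_self
        · exact List.mem_cons_of_mem _ (hsub x hxe)
      · intro x hx
        rcases List.mem_cons.1 hx with rfl | hxt
        · simp
        · have := hall x hxt; simpa using this
  
lemma len_le_dedup (G : List (String × List String)) (q : List String)
    (hnd : q.Nodup) (hk : ∀ v ∈ q, v ∈ keysOf G) : q.length ≤ (keysOf G).dedup.length := by
  have h1 : q.length = q.toFinset.card := by
    rw [List.card_toFinset, List.Nodup.dedup hnd]
  have h2 : q.toFinset ⊆ (keysOf G).toFinset := by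
    intro a ha
    rw [List.mem_toFinset] at ha ⊢
    exact hk a ha
  rw [h1, ← List.card_toFinset]
  exact Finset.card_le_card h2

lemma endB (G : List (String × List String)) (s : String) (q : List String) (i : Nat)
    (hInv : InvB G s q i) (hi : q.length ≤ i) : ∀ x, x ∈ q ↔ ReachG G s x := by
  obtain ⟨hnd, hre, hk, hs, hproc⟩ := hInv
  intro x
  constructor
  · exact hre x
  · intro hx
    induction hx with
    | base => exact hs
    | step hu hy ihu =>
      obtain ⟨j, hj⟩ := List.mem_iff_getElem?.1 ihu
      have hjlen : j < q.length := by
        by_contra hge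
        rw [List.getElem?_eq_none (by omega)] at hj
        cases hj
      exact hproc j _ (by omega) hj _ hy

lemma nwB_loop_iff (G : List (String × List String)) (s : String)
    (hcl : ∀ p ∈ G, ∀ y ∈ p.2, y ∈ G.map Prod.fst) :
    ∀ fuel q i, InvB G s q i → (keysOf G).dedup.length + 1 ≤ fuel + i →
      ∀ x, x ∈ nwB_loop G fuel q q i ↔ ReachG G s x := by
  intro fuel
  induction fuel with
  | zero =>
    intro q i hInv hb x
    have hlen : q.length ≤ i := by
      have := len_le_dedup G q hInv.1 hInv.2.2.1
      omega
    simpa [nwB_loop] using endB G s q i hInv hlen x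
  | succ fuel ih =>
    intro q i hInv hb x
    cases hqi : q[i]? with
    | none =>
      have hlen : q.length ≤ i := by
        by_contra hlt
        rw [List.getElem?_eq_getElem (by omega)] at hqi
        cases hqi
      simpa [nwB_loop, hqi] using endB G s q i hInv hlen x
    | some u =>
      obtain ⟨hnd, hre, hk, hs, hproc⟩ := hInv
      obtain ⟨ext, heq, hnd', hsub, hall⟩ := foldB_spec G (lookB G u) q hnd
      have hilen : i < q.length := by
        by_contra hge
        rw [List.getElem?_eq_none (by omega)] at hqi
        cases hqi
      have humem : u ∈ q := List.mem_of_getElem? hqi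
      have hInv' : InvB G s (q ++ ext) (i + 1) := by
        refine ⟨hnd', ?_, ?_, List.mem_append_left _ hs, ?_⟩
        · intro v hv
          rcases List.mem_append.1 hv with hvq | hve
          · exact hre v hvq
          · exact ReachG.step (hre u humem) (hsub v hve)
        · intro v hv
          rcases List.mem_append.1 hv with hvq | hve
          · exact hk v hvq
          · exact lookA_subset_keys G hcl u v (hsub v hve)
        · intro j w hj hjw y hy
          by_cases hji : j < i
          · have hjq : j < q.length := by omega
            rw [List.getElem?_append_left hjq] at hjw
            exact List.mem_append_left _ (hproc j w hji hjw y hy)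
          · have hji' : j = i := by omega
            subst hji'
            rw [List.getElem?_append_left hilen, hqi] at hjw
            cases hjw
            exact hall y hy
      have hrec := ih (q ++ ext) (i + 1) hInv' (by omega) x
      rw [show nwB_loop G (fuel + 1) q q i
            = nwB_loop G fuel (q ++ ext) (q ++ ext) (i + 1) by
          rw [nwB_loop]
          rw [hqi]
          simp only [heq]]
      exact hrec

lemma B_iff (G : List (String × List String)) (s : String) (hpre : Pre_next_wall_p2 G s) :
    (next_wall_p2_alt G s = true ↔ WinReach G s) := by
  obtain ⟨hsk, hcl⟩ := hpre
  have hInv0 : InvB G s [s] 0 := by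
    refine ⟨List.nodup_singleton s, ?_, ?_, List.mem_singleton_self s, ?_⟩
    · intro v hv; rw [List.mem_singleton] at hv; subst hv; exact ReachG.base
    · intro v hv; rw [List.mem_singleton] at hv; subst hv; exact hsk
    · intro j w hj; omega
  have hfuel : (keysOf G).dedup.length + 1 ≤ (G.length + 2) + 0 := by
    have h1 : (keysOf G).dedup.length ≤ (keysOf G).length :=
      List.Sublist.length_le (List.dedup_sublist _)
    have h2 : (keysOf G).length = G.length := List.length_map ..
    omega
  have hofl : PySem.Set.ofList [s] = [s] := rfl
  have hseen := nwB_loop_iff G s hcl (G.length + 2) [s] 0 hInv0 hfuel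
  unfold next_wall_p2_alt
  rw [hofl]
  rw [List.any_eq_true]
  constructor
  · rintro ⟨v, hv, hpred⟩
    rw [Bool.and_eq_true, bne_iff_ne] at hpred
    refine ⟨v, (hseen v).1 hv, hpred.1, ?_⟩
    have := hpred.2
    rw [PySem.Set.contains_iff] at this
    simpa [p2winB, PySem.Set.mem_ofList, p2winA] using this
  · rintro ⟨v, hre, hvs, hwin⟩
    refine ⟨v, (hseen v).2 hre, ?_⟩
    rw [Bool.and_eq_true, bne_iff_ne]
    refine ⟨hvs, ?_⟩
    rw [PySem.Set.contains_iff]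
    simpa [p2winB, PySem.Set.mem_ofList, p2winA] using hwin

-- ===== VERDICT (by name: the statement is the Claim_ definition above) =====
theorem next_wall_p2_spec : Claim_equal_next_wall_p2 := by
  intro G s _hdom hpre
  unfold Spec_next_wall_p2
  rw [Bool.eq_iff_iff, A_iff G s hpre, B_iff G s hpre]
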